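-- pv_equiv track=rewrite | github.com/22shtz/Python-code | tema7.py | adaugare_muchie_orientat
-- ===== SOURCE A (Python) =====
-- def adaugare_muchie_orientat(graf, muchie):
--     if(muchie==[]):
--         return graf
--     else:
--         if (muchie[0][0] in graf):
--             graf[muchie[0][0]].add(muchie[0][1])
--         else:
--             graf[muchie[0][0]]={muchie[0][1]}
--         if (not muchie[0][1] in graf):
--             graf[muchie[0][1]] = set()
--         return adaugare_muchie_orientat(graf,muchie[1:])
-- ===== SOURCE B (Python) =====
-- # Two staged passes instead of A's recursion with slice copies: pass 1 registers
-- # every endpoint as a key, pass 2 adds the edges; mutates graf in place and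
-- # returns it like A.
-- def adaugare_muchie_orientat(graf, muchie):
--     for e in muchie:
--         if e[0] not in graf:
--             graf[e[0]] = set()
--         if e[1] not in graf:
--             graf[e[1]] = set()
--     for e in muchie:
--         graf[e[0]].add(e[1])
--     return graf
-- ===== Notes on version B (the rewrite author's own statement) =====
-- stated objective: alternative
-- what changed: replaces A's recursion over slice copies muchie[1:] by two staged iterative passes: first register every endpoint as a key, then add all edges to the source sets
import Mathlib
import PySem

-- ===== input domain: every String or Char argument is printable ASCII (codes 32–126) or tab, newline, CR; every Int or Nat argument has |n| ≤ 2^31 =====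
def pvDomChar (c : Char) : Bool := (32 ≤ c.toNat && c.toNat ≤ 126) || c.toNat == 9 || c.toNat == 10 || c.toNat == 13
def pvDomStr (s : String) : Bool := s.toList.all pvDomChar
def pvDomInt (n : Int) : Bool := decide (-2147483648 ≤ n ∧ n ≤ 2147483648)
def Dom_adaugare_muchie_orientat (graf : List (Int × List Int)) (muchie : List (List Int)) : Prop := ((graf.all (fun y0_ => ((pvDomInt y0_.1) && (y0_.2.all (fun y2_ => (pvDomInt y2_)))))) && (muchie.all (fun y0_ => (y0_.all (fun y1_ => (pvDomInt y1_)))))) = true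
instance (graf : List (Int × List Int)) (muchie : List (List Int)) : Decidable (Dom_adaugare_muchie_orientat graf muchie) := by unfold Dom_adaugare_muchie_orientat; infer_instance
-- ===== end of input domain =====

-- ===== PORT A =====
-- B replaces A's recursion with copying slices muchie[1:] by two staged linear passes.
-- Both Pythons mutate graf in place; the equivalence proved here is about the return value.
-- A's tail recursion on the dict and the remaining edge list; muchie[1:] is a PySem slice.
def pvRecA (g : PySem.Dict Int (PySem.Set Int)) (muchie : List (List Int)) : PySem.Dict Int (PySem.Set Int) :=
  match muchie with
  | [] => g
  | e :: rest =>
    let u := PySem.List.pyGetD e 0 0      -- muchie[0][0] (Pre_ guarantees the index exists)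
    let v := PySem.List.pyGetD e 1 0      -- muchie[0][1]
    let g1 := if g.contains u then g.modify u PySem.Set.empty (fun s => PySem.Set.add s v)
              else g.insert u (PySem.Set.add PySem.Set.empty v)
    let g2 := if ¬ (g1.contains v) then g1.insert v PySem.Set.empty else g1
    pvRecA g2 (PySem.List.slice (e :: rest) (some 1) none)
termination_by muchie.length
decreasing_by simp [PySem.List.slice_from_one]

def adaugare_muchie_orientat (graf : List (Int × List Int)) (muchie : List (List Int)) : List (Int × List Int) :=
  (pvRecA (PySem.Dict.mk graf) muchie).items

-- ===== PORT B =====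
-- pass 1 body: register both endpoints of one edge as keys
def pvEnsure (g : PySem.Dict Int (PySem.Set Int)) (e : List Int) : PySem.Dict Int (PySem.Set Int) :=
  let g1 := if ¬ g.contains (PySem.List.pyGetD e 0 0) then g.insert (PySem.List.pyGetD e 0 0) PySem.Set.empty else g
  if ¬ g1.contains (PySem.List.pyGetD e 1 0) then g1.insert (PySem.List.pyGetD e 1 0) PySem.Set.empty else g1

-- pass 2 body: graf[e[0]].add(e[1]) (the key exists after pass 1)
def pvAddE (g : PySem.Dict Int (PySem.Set Int)) (e : List Int) : PySem.Dict Int (PySem.Set Int) :=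
  g.modify (PySem.List.pyGetD e 0 0) PySem.Set.empty (fun s => PySem.Set.add s (PySem.List.pyGetD e 1 0))

def adaugare_muchie_orientat_alt (graf : List (Int × List Int)) (muchie : List (List Int)) : List (Int × List Int) :=
  (muchie.foldl pvAddE (muchie.foldl pvEnsure (PySem.Dict.mk graf))).items

-- ===== PRECONDITION & SPEC =====
-- A raises IndexError when some edge has fewer than two endpoints; Pre_ excludes exactly that.
def Pre_adaugare_muchie_orientat (graf : List (Int × List Int)) (muchie : List (List Int)) : Prop :=
  ∀ e ∈ muchie, 2 ≤ e.length
instance (graf : List (Int × List Int)) (muchie : List (List Int)) : Decidable (Pre_adaugare_muchie_orientat graf muchie) := by unfold Pre_adaugare_muchie_orientat; infer_instance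

def pvWitness_adaugare_muchie_orientat : (List (Int × List Int)) × List (List Int) :=
  ([(1, [2])], [[1, 2], [2, 3], [1, 3]])

def Spec_adaugare_muchie_orientat (graf : List (Int × List Int)) (muchie : List (List Int)) (out : List (Int × List Int)) : Prop := out = adaugare_muchie_orientat_alt graf muchie
instance (graf : List (Int × List Int)) (muchie : List (List Int)) (out : List (Int × List Int)) : Decidable (Spec_adaugare_muchie_orientat graf muchie out) := by unfold Spec_adaugare_muchie_orientat; infer_instance

-- ===== CLAIM (what is proved, stated in full; the proofs are below) =====
def Claim_equal_adaugare_muchie_orientat : Prop := ∀ (graf : List (Int × List Int)) (muchie : List (List Int)), Dom_adaugare_muchie_orientat graf muchie → Pre_adaugare_muchie_orientat graf muchie → Spec_adaugare_muchie_orientat graf muchie (adaugare_muchie_orientat graf muchie)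

-- ===== LEMMAS AND PROOFS =====
-- A's loop body, as a step function (proof-side helper).
def pvStepA (g : PySem.Dict Int (PySem.Set Int)) (e : List Int) : PySem.Dict Int (PySem.Set Int) :=
  let u := PySem.List.pyGetD e 0 0
  let v := PySem.List.pyGetD e 1 0
  let g1 := if g.contains u then g.modify u PySem.Set.empty (fun s => PySem.Set.add s v)
            else g.insert u (PySem.Set.add PySem.Set.empty v)
  if ¬ (g1.contains v) then g1.insert v PySem.Set.empty else g1

theorem pvRecA_eq_foldl (muchie : List (List Int)) :
    ∀ g : PySem.Dict Int (PySem.Set Int), pvRecA g muchie = muchie.foldl pvStepA g := by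
  induction muchie with
  | nil => intro g; simp [pvRecA]
  | cons e rest ih =>
    intro g
    rw [pvRecA, PySem.List.slice_from_one]
    simp only [List.tail_cons, List.foldl_cons]
    exact ih _

-- inserting a fresh key commutes with modifying a present (hence different) key
theorem pv_insert_modify_comm (g : PySem.Dict Int (PySem.Set Int)) (u k : Int)
    (w d0 : PySem.Set Int) (f : PySem.Set Int → PySem.Set Int)
    (hu : g.contains u = true) (hk : g.contains k = false) :
    (g.insert k w).modify u d0 f = (g.modify u d0 f).insert k w := by
  have hne : u ≠ k := by intro h; rw [h, hk] at hu; exact Bool.false_ne_true hu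
  simp only [PySem.Dict.modify]
  rw [PySem.Dict.getD_insert_of_ne _ _ _ hne]
  have hcu : (g.insert k w).contains u = true := by
    rw [PySem.Dict.contains_insert]; simp [hu]
  have hck : (g.insert u (f (g.getD u d0))).contains k = false := by
    rw [PySem.Dict.contains_insert]; simp [hk, Ne.symm hne]
  apply PySem.Dict.ext
  rw [PySem.Dict.items_insert_of_contains _ _ hcu,
      PySem.Dict.items_insert_of_not_contains _ _ hk,
      PySem.Dict.items_insert_of_not_contains _ _ hck,
      PySem.Dict.items_insert_of_contains _ _ hu,
      List.map_append]
  simp [Ne.symm hne]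

-- pvEnsure only adds keys: membership is monotone, and both endpoints end up present
theorem pv_contains_ensure (g : PySem.Dict Int (PySem.Set Int)) (e : List Int) (k : Int)
    (h : g.contains k = true) : (pvEnsure g e).contains k = true := by
  simp only [pvEnsure]
  split_ifs <;> simp [PySem.Dict.contains_insert, h]

theorem pv_contains_ensure_self (g : PySem.Dict Int (PySem.Set Int)) (e : List Int) :
    (pvEnsure g e).contains (PySem.List.pyGetD e 0 0) = true := by
  simp only [pvEnsure]
  split_ifs with h1 h2 h3 <;>
    simp_all [PySem.Dict.contains_insert]

theorem pv_contains_addE (g : PySem.Dict Int (PySem.Set Int)) (e : List Int) (k : Int)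
    (hu : g.contains (PySem.List.pyGetD e 0 0) = true) :
    (pvAddE g e).contains k = g.contains k := by
  simp only [pvAddE]
  rw [PySem.Dict.contains_modify]
  by_cases h : k = PySem.List.pyGetD e 0 0
  · subst h; simp [hu]
  · simp [h]

-- A's step is ensure-then-add on a single edge
theorem pv_stepA_eq (g : PySem.Dict Int (PySem.Set Int)) (e : List Int) :
    pvStepA g e = pvAddE (pvEnsure g e) e := by
  simp only [pvStepA, pvEnsure, pvAddE]
  by_cases hu : g.contains (PySem.List.pyGetD e 0 0)
  · simp only [hu, if_true, not_true, if_false, ite_false, ite_true]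
    by_cases hv : g.contains (PySem.List.pyGetD e 1 0)
    · simp [hv, PySem.Dict.contains_modify, hu]
    · have hvb : g.contains (PySem.List.pyGetD e 1 0) = false := by simpa using hv
      have hvu : ((PySem.List.pyGetD e 1 0 : Int) == PySem.List.pyGetD e 0 0) = false := by
        by_contra h
        simp only [Bool.not_eq_false, beq_iff_eq] at h
        rw [h, hu] at hvb; simp at hvb
      simp only [PySem.Dict.contains_modify, hvu, hvb, Bool.false_or, Bool.not_false,
        if_true, ite_true, ite_false, not_false_iff]
      exact (pv_insert_modify_comm g _ _ _ _ _ hu hvb).symm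
  · have hub : g.contains (PySem.List.pyGetD e 0 0) = false := by simpa using hu
    simp only [hu, hub, if_false, ite_false, ite_true, not_false_iff, if_true]
    have hmod : (g.insert (PySem.List.pyGetD e 0 0) PySem.Set.empty).modify
        (PySem.List.pyGetD e 0 0) PySem.Set.empty
        (fun s => PySem.Set.add s (PySem.List.pyGetD e 1 0))
        = g.insert (PySem.List.pyGetD e 0 0)
            (PySem.Set.add PySem.Set.empty (PySem.List.pyGetD e 1 0)) := by
      simp only [PySem.Dict.modify]
      rw [PySem.Dict.getD_insert_self, PySem.Dict.insert_insert_self]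
    by_cases hv : (g.insert (PySem.List.pyGetD e 0 0) PySem.Set.empty).contains
        (PySem.List.pyGetD e 1 0)
    · have hv2 : (g.insert (PySem.List.pyGetD e 0 0)
          (PySem.Set.add PySem.Set.empty (PySem.List.pyGetD e 1 0))).contains
          (PySem.List.pyGetD e 1 0) = true := by
        rw [PySem.Dict.contains_insert] at hv ⊢; exact hv
      simp only [hv, hv2, Bool.false_eq_true, not_false_iff, not_true, ite_true, ite_false,
        if_true, if_false]
      exact hmod.symm
    · have hvb : (g.insert (PySem.List.pyGetD e 0 0) PySem.Set.empty).contains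
          (PySem.List.pyGetD e 1 0) = false := by simpa using hv
      have hv2 : (g.insert (PySem.List.pyGetD e 0 0)
          (PySem.Set.add PySem.Set.empty (PySem.List.pyGetD e 1 0))).contains
          (PySem.List.pyGetD e 1 0) = false := by
        rw [PySem.Dict.contains_insert] at hvb ⊢; exact hvb
      have hcu : (g.insert (PySem.List.pyGetD e 0 0) PySem.Set.empty).contains
          (PySem.List.pyGetD e 0 0) = true := PySem.Dict.contains_insert_self _ _ _
      simp only [hv, hvb, hv2, Bool.false_eq_true, not_false_iff, not_true, ite_true, ite_false,
        if_true, if_false]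
      rw [pv_insert_modify_comm _ _ _ _ _ _ hcu hvb, hmod]

-- once an edge's source key is present, its add commutes past any later ensure
theorem pv_addE_ensure_comm (g : PySem.Dict Int (PySem.Set Int)) (e e' : List Int)
    (hu : g.contains (PySem.List.pyGetD e 0 0) = true) :
    pvAddE (pvEnsure g e') e = pvEnsure (pvAddE g e) e' := by
  have hca := pv_contains_addE g e (hu := hu)
  simp only [pvEnsure]
  by_cases h1 : g.contains (PySem.List.pyGetD e' 0 0)
  · have h1' : (pvAddE g e).contains (PySem.List.pyGetD e' 0 0) = true := by rw [hca]; exact h1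
    simp only [h1, h1', not_true, if_false, ite_false, ite_true]
    rw [hca]
    by_cases h2 : g.contains (PySem.List.pyGetD e' 1 0)
    · simp [h2]
    · have h2b : g.contains (PySem.List.pyGetD e' 1 0) = false := by simpa using h2
      simp only [h2b, Bool.false_eq_true, not_false_iff, if_true, ite_true, ite_false]
      simp only [pvAddE]
      exact pv_insert_modify_comm g _ _ _ _ _ hu h2b
  · have h1b : g.contains (PySem.List.pyGetD e' 0 0) = false := by simpa using h1
    have h1' : (pvAddE g e).contains (PySem.List.pyGetD e' 0 0) = false := by rw [hca]; exact h1b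
    have hcomm1 : pvAddE (g.insert (PySem.List.pyGetD e' 0 0) PySem.Set.empty) e
        = (pvAddE g e).insert (PySem.List.pyGetD e' 0 0) PySem.Set.empty := by
      simp only [pvAddE]
      exact pv_insert_modify_comm g _ _ _ _ _ hu h1b
    simp only [h1b, h1', Bool.false_eq_true, not_false_iff, if_true, ite_true, ite_false]
    have hcond : ((pvAddE g e).insert (PySem.List.pyGetD e' 0 0) PySem.Set.empty).contains
        (PySem.List.pyGetD e' 1 0)
        = (g.insert (PySem.List.pyGetD e' 0 0) PySem.Set.empty).contains
        (PySem.List.pyGetD e' 1 0) := by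
      rw [PySem.Dict.contains_insert, PySem.Dict.contains_insert, hca]
    rw [hcond]
    by_cases h2 : (g.insert (PySem.List.pyGetD e' 0 0) PySem.Set.empty).contains
        (PySem.List.pyGetD e' 1 0)
    · simp only [h2, not_true, ite_false, if_false, ite_true]
      exact hcomm1
    · have h2b : (g.insert (PySem.List.pyGetD e' 0 0) PySem.Set.empty).contains
          (PySem.List.pyGetD e' 1 0) = false := by simpa using h2
      have hcu1 : (g.insert (PySem.List.pyGetD e' 0 0) PySem.Set.empty).contains
          (PySem.List.pyGetD e 0 0) = true := by
        rw [PySem.Dict.contains_insert]; simp [hu]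
      simp only [h2b, Bool.false_eq_true, not_false_iff, if_true, ite_true, ite_false]
      simp only [pvAddE]
      rw [pv_insert_modify_comm _ _ _ _ _ _ hcu1 h2b]
      have := hcomm1
      simp only [pvAddE] at this
      rw [this]

theorem pv_addE_foldl_ensure (es : List (List Int)) (e : List Int) :
    ∀ g : PySem.Dict Int (PySem.Set Int), g.contains (PySem.List.pyGetD e 0 0) = true →
      pvAddE (es.foldl pvEnsure g) e = es.foldl pvEnsure (pvAddE g e) := by
  induction es with
  | nil => intro g _; rfl
  | cons e' es ih =>
    intro g hu
    simp only [List.foldl_cons]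
    rw [ih _ (pv_contains_ensure g e' _ hu), pv_addE_ensure_comm g e e' hu]

theorem pv_foldl_interchange (es : List (List Int)) :
    ∀ g : PySem.Dict Int (PySem.Set Int),
      es.foldl pvStepA g = es.foldl pvAddE (es.foldl pvEnsure g) := by
  induction es with
  | nil => intro g; rfl
  | cons e es ih =>
    intro g
    simp only [List.foldl_cons]
    rw [ih (pvStepA g e),
        pv_addE_foldl_ensure es e (pvEnsure g e) (pv_contains_ensure_self g e),
        pv_stepA_eq g e]

-- ===== VERDICT (by name: the statement is the Claim_ definition above) =====
theorem adaugare_muchie_orientat_spec : Claim_equal_adaugare_muchie_orientat := by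
  intro graf muchie _ _
  unfold Spec_adaugare_muchie_orientat adaugare_muchie_orientat adaugare_muchie_orientat_alt
  rw [pvRecA_eq_foldl, pv_foldl_interchange]
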